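-- pv_equiv track=rewrite | github.com/JAgbanwa/miscellaneousmathproblems | diophantine-y2-x3y-z4/modular_analysis.py | count_fp_points
-- ===== SOURCE A (Python) =====
-- def count_fp_points(p):
--     """Count affine points over F_p."""
--     count = 0
--     for x in range(p):
--         x3 = pow(x, 3, p)
--         for z in range(p):
--             z4 = pow(z, 4, p)
--             c = (z4 + 1) % p
--             # need y^2 - x3*y + c = 0 mod p
--             # discriminant: x3^2 - 4c mod p
--             disc = (x3 * x3 - 4 * c) % p
--             # check if disc is a QR mod p
--             if disc == 0:
--                 count += 1  # one root y = x3/2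
--             else:
--                 # Euler criterion
--                 if pow(disc, (p - 1) // 2, p) == 1:
--                     count += 2  # two roots
--     return count
-- ===== SOURCE B (Python) =====
-- def count_fp_points(p):
--     """Count affine points over F_p."""
--     cube_counts = {}
--     for x in range(p):
--         a = pow(x, 3, p)
--         cube_counts[a] = cube_counts.get(a, 0) + 1
--     quart_counts = {}
--     for z in range(p):
--         b = pow(z, 4, p)
--         quart_counts[b] = quart_counts.get(b, 0) + 1
--     total = 0
--     for a, ca in cube_counts.items():
--         for b, cb in quart_counts.items():
--             disc = (a * a - 4 * ((b + 1) % p)) % p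
--             if disc == 0:
--                 total += ca * cb
--             elif pow(disc, (p - 1) // 2, p) == 1:
--                 total += 2 * (ca * cb)
--     return total
-- ===== Notes on version B (the rewrite author's own statement) =====
-- stated objective: faster
-- what changed: Instead of testing the discriminant for every (x,z) pair, B builds frequency tables of cubic and quartic residues in two O(p) passes and then runs the quadratic-root test once per distinct residue pair, weighting by the product of multiplicities; intended as faster - a timing run measured 2.6x-72x on inputs both finished, though on some very large p both still time out.
import Mathlib
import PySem

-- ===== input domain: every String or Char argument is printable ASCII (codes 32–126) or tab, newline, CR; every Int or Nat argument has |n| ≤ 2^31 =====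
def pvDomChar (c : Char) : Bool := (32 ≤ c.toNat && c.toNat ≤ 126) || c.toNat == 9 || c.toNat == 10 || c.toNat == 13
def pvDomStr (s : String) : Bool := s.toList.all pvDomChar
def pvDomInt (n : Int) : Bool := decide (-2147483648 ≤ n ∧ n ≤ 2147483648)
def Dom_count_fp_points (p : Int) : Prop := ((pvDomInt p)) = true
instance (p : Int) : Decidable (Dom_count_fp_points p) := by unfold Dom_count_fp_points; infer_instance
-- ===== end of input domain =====

-- B replaces A's per-(x,z) discriminant test by two frequency tables of cubic/quartic
-- residues and one weighted test per distinct residue pair (intended as faster; the timing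
-- run measured 2.6x-72x on inputs where both finished).

-- ===== PORT A =====
def count_fp_points (p : Int) : Int :=
  (PySem.List.pyRange 0 p 1).foldl (fun count x =>
    let x3 := PySem.Int.powMod x 3 p
    (PySem.List.pyRange 0 p 1).foldl (fun count z =>
      let z4 := PySem.Int.powMod z 4 p
      let c := PySem.Int.mod (z4 + 1) p
      let disc := PySem.Int.mod (x3 * x3 - 4 * c) p
      if disc = 0 then count + 1
      else if PySem.Int.powMod disc ((PySem.Int.floordiv (p - 1) 2).toNat) p = 1 then count + 2
      else count) count) 0

-- ===== PORT B =====
def count_fp_points_alt (p : Int) : Int :=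
  let cube_counts : PySem.Dict Int Int :=
    (PySem.List.pyRange 0 p 1).foldl (fun d x =>
      let a := PySem.Int.powMod x 3 p
      d.insert a (d.getD a 0 + 1)) PySem.Dict.empty
  let quart_counts : PySem.Dict Int Int :=
    (PySem.List.pyRange 0 p 1).foldl (fun d z =>
      let b := PySem.Int.powMod z 4 p
      d.insert b (d.getD b 0 + 1)) PySem.Dict.empty
  cube_counts.items.foldl (fun total aca =>
    quart_counts.items.foldl (fun total bcb =>
      let disc := PySem.Int.mod (aca.1 * aca.1 - 4 * (PySem.Int.mod (bcb.1 + 1) p)) p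
      if disc = 0 then total + aca.2 * bcb.2
      else if PySem.Int.powMod disc ((PySem.Int.floordiv (p - 1) 2).toNat) p = 1 then
        total + 2 * (aca.2 * bcb.2)
      else total) total) 0

-- ===== PRECONDITION & SPEC =====
def Spec_count_fp_points (p : Int) (out : Int) : Prop := out = count_fp_points_alt p
instance (p : Int) (out : Int) : Decidable (Spec_count_fp_points p out) := by unfold Spec_count_fp_points; infer_instance

-- ===== CLAIM (what is proved, stated in full; the proofs are below) =====
def Claim_equal_count_fp_points : Prop := ∀ (p : Int), Dom_count_fp_points p → Spec_count_fp_points p (count_fp_points p)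

-- ===== LEMMAS AND PROOFS =====

-- the per-pair root-count contribution, shared shape of both ports' branch bodies
def pvF (p a b : Int) : Int :=
  let disc := PySem.Int.mod (a * a - 4 * PySem.Int.mod (b + 1) p) p
  if disc = 0 then 1
  else if PySem.Int.powMod disc ((PySem.Int.floordiv (p - 1) 2).toNat) p = 1 then 2 else 0

lemma pv_branch_add (c1 c2 : Prop) [Decidable c1] [Decidable c2] (count : Int) :
    (if c1 then count + 1 else if c2 then count + 2 else count)
      = count + (if c1 then (1 : Int) else if c2 then 2 else 0) := by
  split_ifs <;> ring

lemma pv_branch_add_w (c1 c2 : Prop) [Decidable c1] [Decidable c2] (count w : Int) :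
    (if c1 then count + w else if c2 then count + 2 * w else count)
      = count + w * (if c1 then (1 : Int) else if c2 then 2 else 0) := by
  split_ifs <;> ring

lemma pv_sum_ite_zero (l : List Int) (m : Int) (g : Int → Int) (hm : m ∉ l) :
    (l.map (fun a => if a = m then g a else 0)).sum = 0 := by
  induction l with
  | nil => simp
  | cons a l ih =>
    simp only [List.mem_cons, not_or] at hm
    rw [List.map_cons, List.sum_cons, if_neg (fun h => hm.1 h.symm), ih hm.2]
    ring

lemma pv_sum_ite_single (l : List Int) (m : Int) (g : Int → Int) (hn : l.Nodup)
    (hm : m ∈ l) : (l.map (fun a => if a = m then g a else 0)).sum = g m := by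
  induction l with
  | nil => cases hm
  | cons a l ih =>
    rcases List.mem_cons.1 hm with h | h
    · subst h
      have : m ∉ l := (List.nodup_cons.1 hn).1
      simp [pv_sum_ite_zero l m g this]
    · have hne : a ≠ m := by
        rintro rfl; exact (List.nodup_cons.1 hn).1 h
      simp [hne, ih (List.nodup_cons.1 hn).2 h]

lemma pv_sum_count_dedup (M : List Int) (g : Int → Int) :
    (M.dedup.map (fun a => (M.count a : Int) * g a)).sum = (M.map g).sum := by
  induction M with
  | nil => simp
  | cons m M ih =>
    by_cases hm : m ∈ M
    · rw [List.dedup_cons_of_mem hm]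
      have hsplit : ∀ a ∈ M.dedup,
          (((m :: M).count a : Int)) * g a
            = (M.count a : Int) * g a + (if a = m then g a else 0) := by
        intro a _
        rw [List.count_cons]
        by_cases h : a = m
        · subst h
          simp only [BEq.rfl, if_true]
          push_cast
          ring
        · simp only [beq_iff_eq, h, if_false]
          rw [if_neg (fun hh => h hh.symm)]
          push_cast
          ring
      rw [List.map_congr_left hsplit]
      have hadd : (M.dedup.map (fun a => (M.count a : Int) * g a
            + (if a = m then g a else 0))).sum
          = (M.dedup.map (fun a => (M.count a : Int) * g a)).sum
            + (M.dedup.map (fun a => if a = m then g a else 0)).sum := by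
        induction M.dedup with
        | nil => simp
        | cons b l ihl => simp [List.map_cons, List.sum_cons, ihl]; ring
      rw [hadd, ih,
        pv_sum_ite_single M.dedup m g M.nodup_dedup (List.mem_dedup.2 hm)]
      rw [List.map_cons, List.sum_cons]
      ring
    · rw [List.dedup_cons_of_notMem hm]
      have hcongr : ∀ a ∈ M.dedup,
          (((m :: M).count a : Int)) * g a = (M.count a : Int) * g a := by
        intro a ha
        have : a ≠ m := by
          rintro rfl; exact hm (List.mem_dedup.1 ha)
        rw [List.count_cons]
        simp only [beq_iff_eq]
        rw [if_neg (fun hh => this hh.symm)]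
        simp
      have hcm : ((m :: M).count m : Int) = 1 := by
        rw [List.count_cons]
        simp [List.count_eq_zero_of_not_mem hm]
      simp only [List.map_cons, List.sum_cons]
      rw [hcm, List.map_congr_left hcongr, ih]
      simp

lemma pv_sum_count_ofList (M : List Int) (g : Int → Int) :
    ((PySem.Set.ofList M).map (fun a => (M.count a : Int) * g a)).sum = (M.map g).sum := by
  have hperm : (PySem.Set.ofList M).Perm M.dedup :=
    (List.perm_ext_iff_of_nodup (PySem.Set.nodup_ofList M) M.nodup_dedup).2
      (by intro a; simp [PySem.Set.mem_ofList, List.mem_dedup])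
  rw [(hperm.map _).sum_eq, pv_sum_count_dedup]

-- A as a double sum of pvF over the raw residue lists
lemma pv_A_sum (p : Int) :
    count_fp_points p
      = (((PySem.List.pyRange 0 p 1).map (fun x => PySem.Int.powMod x 3 p)).map (fun m =>
          (((PySem.List.pyRange 0 p 1).map (fun z => PySem.Int.powMod z 4 p)).map
            (fun n => pvF p m n)).sum)).sum := by
  unfold count_fp_points
  have hinner : ∀ (x3 count : Int),
      (PySem.List.pyRange 0 p 1).foldl (fun count z =>
        let z4 := PySem.Int.powMod z 4 p
        let c := PySem.Int.mod (z4 + 1) p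
        let disc := PySem.Int.mod (x3 * x3 - 4 * c) p
        if disc = 0 then count + 1
        else if PySem.Int.powMod disc ((PySem.Int.floordiv (p - 1) 2).toNat) p = 1 then count + 2
        else count) count
      = count + ((PySem.List.pyRange 0 p 1).map
          (fun z => pvF p x3 (PySem.Int.powMod z 4 p))).sum := by
    intro x3 count
    have hfun : (fun (count : Int) z =>
        let z4 := PySem.Int.powMod z 4 p
        let c := PySem.Int.mod (z4 + 1) p
        let disc := PySem.Int.mod (x3 * x3 - 4 * c) p
        if disc = 0 then count + 1
        else if PySem.Int.powMod disc ((PySem.Int.floordiv (p - 1) 2).toNat) p = 1 then count + 2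
        else count)
        = fun (count : Int) z => count + pvF p x3 (PySem.Int.powMod z 4 p) := by
      funext count z
      simp only [pvF]
      exact pv_branch_add _ _ count
    rw [hfun, PySem.List.foldl_add]
  have houter : (fun (count x : Int) =>
      let x3 := PySem.Int.powMod x 3 p
      (PySem.List.pyRange 0 p 1).foldl (fun count z =>
        let z4 := PySem.Int.powMod z 4 p
        let c := PySem.Int.mod (z4 + 1) p
        let disc := PySem.Int.mod (x3 * x3 - 4 * c) p
        if disc = 0 then count + 1
        else if PySem.Int.powMod disc ((PySem.Int.floordiv (p - 1) 2).toNat) p = 1 then count + 2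
        else count) count)
      = fun (count x : Int) => count + ((PySem.List.pyRange 0 p 1).map
          (fun z => pvF p (PySem.Int.powMod x 3 p) (PySem.Int.powMod z 4 p))).sum := by
    funext count x
    exact hinner (PySem.Int.powMod x 3 p) count
  rw [houter, PySem.List.foldl_add]
  simp only [Int.zero_add, List.map_map]
  rfl

-- B as a weighted double sum over the distinct residues
lemma pv_B_sum (p : Int) :
    count_fp_points_alt p
      = ((PySem.Set.ofList ((PySem.List.pyRange 0 p 1).map
            (fun x => PySem.Int.powMod x 3 p))).map (fun a =>
          ((((PySem.List.pyRange 0 p 1).map (fun x => PySem.Int.powMod x 3 p)).count a : Int))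
            * ((PySem.Set.ofList ((PySem.List.pyRange 0 p 1).map
                (fun z => PySem.Int.powMod z 4 p))).map (fun b =>
              ((((PySem.List.pyRange 0 p 1).map
                (fun z => PySem.Int.powMod z 4 p)).count b : Int)) * pvF p a b)).sum)).sum := by
  unfold count_fp_points_alt
  have hdict : ∀ (e : Nat),
      (PySem.List.pyRange 0 p 1).foldl (fun d x =>
        let a := PySem.Int.powMod x e p
        d.insert a (d.getD a 0 + 1)) PySem.Dict.empty
      = PySem.Dict.counter ((PySem.List.pyRange 0 p 1).map (fun x => PySem.Int.powMod x e p)) := by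
    intro e
    rw [← PySem.Dict.foldl_insert_getD_add_one_eq_counter, List.foldl_map]
  simp only [hdict, PySem.Dict.items_counter]
  set L3 := (PySem.List.pyRange 0 p 1).map (fun x => PySem.Int.powMod x 3 p) with hL3
  set L4 := (PySem.List.pyRange 0 p 1).map (fun z => PySem.Int.powMod z 4 p) with hL4
  have hinner : ∀ (aca : Int × Int) (total : Int),
      (((PySem.Set.ofList L4).map (fun k => (k, (L4.count k : Int)))).foldl (fun total bcb =>
        let disc := PySem.Int.mod (aca.1 * aca.1 - 4 * (PySem.Int.mod (bcb.1 + 1) p)) p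
        if disc = 0 then total + aca.2 * bcb.2
        else if PySem.Int.powMod disc ((PySem.Int.floordiv (p - 1) 2).toNat) p = 1 then
          total + 2 * (aca.2 * bcb.2)
        else total) total)
      = total + ((PySem.Set.ofList L4).map
          (fun b => aca.2 * (L4.count b : Int) * pvF p aca.1 b)).sum := by
    intro aca total
    have hfun : (fun (total : Int) (bcb : Int × Int) =>
        let disc := PySem.Int.mod (aca.1 * aca.1 - 4 * (PySem.Int.mod (bcb.1 + 1) p)) p
        if disc = 0 then total + aca.2 * bcb.2
        else if PySem.Int.powMod disc ((PySem.Int.floordiv (p - 1) 2).toNat) p = 1 then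
          total + 2 * (aca.2 * bcb.2)
        else total)
        = fun (total : Int) bcb => total + (aca.2 * bcb.2) * pvF p aca.1 bcb.1 := by
      funext total bcb
      simp only [pvF]
      exact pv_branch_add_w _ _ total (aca.2 * bcb.2)
    rw [hfun, PySem.List.foldl_add, List.map_map]
    rfl
  have houter : (fun (total : Int) (aca : Int × Int) =>
      (((PySem.Set.ofList L4).map (fun k => (k, (L4.count k : Int)))).foldl (fun total bcb =>
        let disc := PySem.Int.mod (aca.1 * aca.1 - 4 * (PySem.Int.mod (bcb.1 + 1) p)) p
        if disc = 0 then total + aca.2 * bcb.2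
        else if PySem.Int.powMod disc ((PySem.Int.floordiv (p - 1) 2).toNat) p = 1 then
          total + 2 * (aca.2 * bcb.2)
        else total) total))
      = fun (total : Int) (aca : Int × Int) => total + ((PySem.Set.ofList L4).map
          (fun b => aca.2 * (L4.count b : Int) * pvF p aca.1 b)).sum := by
    funext total aca
    exact hinner aca total
  rw [houter, PySem.List.foldl_add, List.map_map]
  rw [Int.zero_add]
  apply congrArg
  apply List.map_congr_left
  intro a _
  simp only [Function.comp_apply]
  rw [← List.sum_map_mul_left]
  apply congrArg
  apply List.map_congr_left
  intro b _
  ring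

theorem pv_eq (p : Int) : count_fp_points p = count_fp_points_alt p := by
  rw [pv_A_sum, pv_B_sum]
  rw [← pv_sum_count_ofList]
  apply congrArg
  apply List.map_congr_left
  intro a _
  rw [← pv_sum_count_ofList]

-- ===== VERDICT (by name: the statement is the Claim_ definition above) =====
theorem count_fp_points_spec : Claim_equal_count_fp_points := by
  intro p _
  unfold Spec_count_fp_points
  exact pv_eq p
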